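-- pv_equiv track=rewrite | github.com/nalimeitb/codingtest_Python | 프로그래머스/0/181862. 세 개의 구분자/세 개의 구분자.py | solution
-- ===== SOURCE A (Python) =====
-- def solution(myStr):
--     answer = []
--
--     myStr = myStr.replace('a', ' ')
--     myStr = myStr.replace('b', ' ')
--     myStr = myStr.replace('c', ' ')
--     myStr = myStr.split(' ')
--
--     for i in myStr :
--         if i != '' :
--             answer.append(i)
--
--     if answer == [] :
--         answer = ["EMPTY"]
--
--     return answer
-- ===== SOURCE B (Python) =====
-- def solution(myStr):
--     answer = []
--     cur = ''
--     for ch in myStr: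
--         if ch == 'a' or ch == 'b' or ch == 'c' or ch == ' ':
--             if cur != '':
--                 answer.append(cur)
--             cur = ''
--         else:
--             cur = cur + ch
--     if cur != '':
--         answer.append(cur)
--     if answer == []:
--         return ['EMPTY']
--     return answer
-- ===== Notes on version B (the rewrite author's own statement) =====
-- stated objective: alternative
-- what changed: Replaced the three whole-string replace passes plus split plus filter loop with a single-pass character tokenizer that accumulates the current token and flushes it at each delimiter (a, b, c, or a pre-existing space).
import Mathlib
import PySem

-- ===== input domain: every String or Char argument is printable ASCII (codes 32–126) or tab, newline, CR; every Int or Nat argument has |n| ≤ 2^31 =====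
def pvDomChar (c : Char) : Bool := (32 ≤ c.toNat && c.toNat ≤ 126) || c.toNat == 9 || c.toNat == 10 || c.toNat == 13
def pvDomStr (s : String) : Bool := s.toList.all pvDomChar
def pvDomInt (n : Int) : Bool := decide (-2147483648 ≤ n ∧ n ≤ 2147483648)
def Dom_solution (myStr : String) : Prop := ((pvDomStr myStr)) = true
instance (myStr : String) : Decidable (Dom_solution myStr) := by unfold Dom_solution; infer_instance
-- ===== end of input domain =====

-- B replaces A's three whole-string replace passes + split + filter loop with a single-pass
-- tokenizer over the characters (objective: alternative decomposition, same O(n) cost).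


-- ===== PORT A =====
def solution (myStr : String) : List String :=
  let s3 : List Char :=
    PySem.Chars.replace (PySem.Chars.replace (PySem.Chars.replace myStr.toList ['a'] [' ']) ['b'] [' ']) ['c'] [' ']
  let parts : List String := (PySem.Chars.splitOn s3 [' ']).map String.ofList
  let answer := parts.foldl (fun acc i => if i ≠ "" then acc ++ [i] else acc) []
  if answer = [] then ["EMPTY"] else answer

-- ===== PORT B =====
def solution_alt (myStr : String) : List String :=
  let step : List String × List Char → Char → List String × List Char := fun st ch =>
    if ch = 'a' ∨ ch = 'b' ∨ ch = 'c' ∨ ch = ' ' then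
      (if st.2 ≠ [] then st.1 ++ [String.ofList st.2] else st.1, [])
    else
      (st.1, st.2 ++ [ch])
  let st := myStr.toList.foldl step ([], [])
  let answer := if st.2 ≠ [] then st.1 ++ [String.ofList st.2] else st.1
  if answer = [] then ["EMPTY"] else answer

-- ===== PRECONDITION & SPEC =====
def Spec_solution (myStr : String) (out : List String) : Prop := out = solution_alt myStr
instance (myStr : String) (out : List String) : Decidable (Spec_solution myStr out) := by unfold Spec_solution; infer_instance

-- ===== CLAIM (what is proved, stated in full; the proofs are below) =====
def Claim_equal_solution : Prop := ∀ (myStr : String), Dom_solution myStr → Spec_solution myStr (solution myStr)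

-- ===== LEMMAS AND PROOFS =====

-- the effect of A's three replaces on one character
def pvRepl (c : Char) : Char :=
  if (if (if c = 'a' then ' ' else c) = 'b' then ' ' else (if c = 'a' then ' ' else c)) = 'c' then ' '
  else (if (if c = 'a' then ' ' else c) = 'b' then ' ' else (if c = 'a' then ' ' else c))

-- single-character replace is a map
theorem replace_go_single (o n : Char) (l : List Char) (fuel : Nat) (acc : List Char)
    (h : l.length <= fuel) :
    PySem.Chars.replace.go [o] [n] fuel l acc = acc.reverse ++ l.map (fun c => if c = o then n else c) := by
  induction l generalizing fuel acc with
  | nil =>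
    cases fuel <;> rw [PySem.Chars.replace.go.eq_def] <;> simp
  | cons c t ih =>
    cases fuel with
    | zero => simp at h
    | succ f =>
      rw [PySem.Chars.replace.go.eq_def]
      simp only [List.isPrefixOf, List.length_cons] at *
      by_cases hc : c = o
      · simp only [hc, BEq.rfl, Bool.and_true, if_pos]
        rw [show List.drop (([] : List Char).length + 1) (o :: t) = t by simp,
            show ([n] : List Char).reverse ++ acc = n :: acc by simp]
        rw [ih f (n :: acc) (by omega)]
        simp
      · have hb : (o == c && true) = false := by
          simp only [Bool.and_true, beq_eq_false_iff_ne]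
          exact Ne.symm hc
        simp only [hb, Bool.false_eq_true, if_false]
        rw [ih f (c :: acc) (by omega)]
        simp [hc]

theorem replace_single (o n : Char) (l : List Char) :
    PySem.Chars.replace l [o] [n] = l.map (fun c => if c = o then n else c) := by
  simp [PySem.Chars.replace, replace_go_single o n l l.length [] (le_refl _)]

-- the token list obtained from splitting l on spaces and dropping empties;
-- cur is the current (reversed) token, as maintained by splitOn.go
def tokL : List Char → List Char → List (List Char)
  | [], cur => if cur = [] then [] else [cur.reverse]
  | c :: rest, cur =>
    if c = ' ' then (if cur = [] then tokL rest [] else cur.reverse :: tokL rest [])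
    else tokL rest (c :: cur)

theorem splitOn_go_filter (l cur : List Char) (acc : List (List Char)) (fuel : Nat)
    (h : l.length <= fuel) :
    (PySem.Chars.splitOn.go [' '] fuel l cur acc).filter (· ≠ []) =
      acc.reverse.filter (· ≠ []) ++ tokL l cur := by
  induction l generalizing fuel cur acc with
  | nil =>
    cases fuel <;> rw [PySem.Chars.splitOn.go.eq_def] <;>
      simp [tokL] <;> by_cases hc : cur = [] <;> simp [hc]
  | cons c t ih =>
    cases fuel with
    | zero => simp at h
    | succ f =>
      rw [PySem.Chars.splitOn.go.eq_def]
      simp only [List.isPrefixOf, List.length_cons] at *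
      by_cases hc : c = ' '
      · simp only [hc, BEq.rfl, Bool.and_true, if_pos, List.length_nil,
          Nat.zero_add, List.drop_succ_cons, List.drop_zero]
        rw [ih [] (cur.reverse :: acc) f (by omega)]
        by_cases h0 : cur = [] <;> simp [tokL, h0, List.filter_append]
      · have hb : (' ' == c && true) = false := by
          simp only [Bool.and_true, beq_eq_false_iff_ne]
          exact Ne.symm hc
        simp only [hb, Bool.false_eq_true, if_false]
        rw [ih (c :: cur) acc f (by omega)]
        simp [tokL, hc]

theorem splitOn_filter (l : List Char) :
    (PySem.Chars.splitOn l [' ']).filter (· ≠ []) = tokL l [] := by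
  have := splitOn_go_filter l [] [] (l.length + 1) (by omega)
  simpa [PySem.Chars.splitOn] using this

-- A's append-if loop is a filter
theorem foldl_filter (parts : List String) :
    parts.foldl (fun acc i => if i ≠ "" then acc ++ [i] else acc) [] = parts.filter (· ≠ "") := by
  simpa using PySem.List.foldl_append_if (fun i => decide (i ≠ "")) id parts []

-- strings vs char lists: filtering the non-empty strings
theorem filter_map_ofList (l : List (List Char)) :
    (l.map String.ofList).filter (· ≠ "") = (l.filter (· ≠ [])).map String.ofList := by
  rw [List.filter_map]
  congr 1
  apply List.filter_congr
  intro x _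
  by_cases hx : x = []
  · subst hx; simp
  · have hne : String.ofList x ≠ "" := by
      intro hcon
      apply hx
      have := congrArg String.toList hcon
      simpa using this
    simp [Function.comp, hx, hne]

-- the replaced character list is a map
theorem s3_eq_map (l : List Char) :
    PySem.Chars.replace (PySem.Chars.replace (PySem.Chars.replace l ['a'] [' ']) ['b'] [' ']) ['c'] [' '] =
      l.map pvRepl := by
  rw [replace_single, replace_single, replace_single, List.map_map, List.map_map]
  rfl

-- B's loop computes the tokens of the replaced character list
theorem foldl_step_tokL (l : List Char) (ans : List String) (cur : List Char) :
    (if (l.foldl (fun st ch =>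
          if ch = 'a' ∨ ch = 'b' ∨ ch = 'c' ∨ ch = ' ' then
            (if st.2 ≠ [] then st.1 ++ [String.ofList st.2] else st.1, [])
          else (st.1, st.2 ++ [ch])) (ans, cur)).2 ≠ [] then
        (l.foldl (fun st ch =>
          if ch = 'a' ∨ ch = 'b' ∨ ch = 'c' ∨ ch = ' ' then
            (if st.2 ≠ [] then st.1 ++ [String.ofList st.2] else st.1, [])
          else (st.1, st.2 ++ [ch])) (ans, cur)).1 ++
          [String.ofList ((l.foldl (fun st ch =>
            if ch = 'a' ∨ ch = 'b' ∨ ch = 'c' ∨ ch = ' ' then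
              (if st.2 ≠ [] then st.1 ++ [String.ofList st.2] else st.1, [])
            else (st.1, st.2 ++ [ch])) (ans, cur)).2)]
      else
        (l.foldl (fun st ch =>
          if ch = 'a' ∨ ch = 'b' ∨ ch = 'c' ∨ ch = ' ' then
            (if st.2 ≠ [] then st.1 ++ [String.ofList st.2] else st.1, [])
          else (st.1, st.2 ++ [ch])) (ans, cur)).1) =
      ans ++ (tokL (l.map pvRepl) cur.reverse).map String.ofList := by
  induction l generalizing ans cur with
  | nil =>
    by_cases h0 : cur = [] <;> simp [tokL, h0]
  | cons c t ih =>
    simp only [List.foldl_cons, List.map_cons]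
    by_cases hd : c = 'a' ∨ c = 'b' ∨ c = 'c' ∨ c = ' '
    · have hr : pvRepl c = ' ' := by
        rcases hd with h | h | h | h <;> subst h <;> decide
      rw [if_pos hd, hr]
      by_cases h0 : cur = []
      · subst h0
        simp only [ne_eq, not_true_eq_false, if_false]
        rw [ih ans []]
        simp [tokL]
      · simp only [ne_eq, h0, not_false_eq_true, if_true]
        rw [ih (ans ++ [String.ofList cur]) []]
        simp [tokL, h0]
    · have hr : pvRepl c = c := by
        simp only [not_or] at hd
        simp [pvRepl, hd.1, hd.2.1, hd.2.2.1]
      have hs : c ≠ ' ' := by simp only [not_or] at hd; exact hd.2.2.2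
      rw [if_neg hd, hr]
      rw [ih ans (cur ++ [c])]
      simp [tokL, hs]

-- ===== VERDICT (by name: the statement is the Claim_ definition above) =====
theorem solution_spec : Claim_equal_solution := by
  intro myStr _
  unfold Spec_solution solution solution_alt
  simp only [s3_eq_map, foldl_filter, filter_map_ofList, splitOn_filter, foldl_step_tokL]
  simp
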